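-- pv_equiv track=rewrite | github.com/sinamajidian/Hap10 | extract_scc.py | extract_ccs
-- ===== SOURCE A (Python) =====
-- def extract_ccs(list_varids_infragments):
--
--     """ extracting connected componenets
--
--     input:  A list of lists. Inner list contains the variant indices (varids) of all alleles in the all segments in one fragment (line of fragment matrix)
--     output: A list of lists. Inner list contains the line number of fragment in the fragment file for each cc  [[2], [6], [7, 5, 4, 3, 1, 0]]
--
--     """
--
--     list_ccs_varids=[]
--     list_ccs_fragids=[] # list_fragment_pos list_varid_fragment
--
--
--     for fragid, list_varids_infragment in enumerate(list_varids_infragments):   # each iteration is for one fragment in list_varids_infragments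
--
--         # fragid the 0-based index of this fragment in the list_varid_fragments
--         # list_varid_fragment is a list of numbers (varids)
--         set_varids_infragment = set(list_varids_infragment)
--
--         # obtaining overlap of current fragment with existing (cc)s and reporting the id of those cc. (the cc_id is chanign in each outer for loop)
--
--         cc_id_overlapped_list=[]
--         for cc_id, cc in enumerate(list_ccs_varids):                          # finding the index of cc that are overlapped with the new fragment
--             intersction = set_varids_infragment & cc
--             if len(intersction):
--                 cc_id_overlapped_list.append(cc_id)
--
--         cc_varids_new=set_varids_infragment                                  # new_cc initialized with the indices of the new fragment
--         cc_fragids_new=[fragid]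
--         for cc_id in cc_id_overlapped_list:                                   # adding those cc that are overlapped with the fragment to the new cc
--             cc_varids_new |= list_ccs_varids[cc_id]
--             cc_fragids_new  += list_ccs_fragids[cc_id]
--
--         for cc_id in sorted(cc_id_overlapped_list, reverse=True):             # removing those cc that are overlapped from the list_cc
--             del list_ccs_varids[cc_id]
--             del list_ccs_fragids[cc_id]
--
--         list_ccs_varids.append(cc_varids_new)
--         list_ccs_fragids.append(cc_fragids_new)
--
--     return list_ccs_fragids
-- ===== SOURCE B (Python) =====
-- def extract_ccs(list_varids_infragments):
--     """Connected components of fragments sharing variant ids.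
--
--     Indexed (union-find-flavoured) algorithm: a dict var2cc maps each seen
--     varid to the id of the component currently containing it, so overlapping
--     components are located by direct lookup of the fragment's varids instead
--     of scanning every existing component.  Components are keyed by the index
--     of the fragment that created them, which grows with creation time; since
--     A keeps components in creation order, returning the dict's values in
--     insertion order reproduces A's output exactly.
--     """
--     var2cc = {}    # varid -> id of the component currently containing it
--     cc_frags = {}  # component id -> fragment indices (insertion = creation order)
--     cc_vars = {}   # component id -> set of varids of the component
--     for fragid, varids in enumerate(list_varids_infragments):
--         roots = sorted({var2cc[v] for v in varids if v in var2cc})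
--         vs = set(varids)
--         fl = [fragid]
--         for r in roots:
--             vs |= cc_vars.pop(r)
--             fl += cc_frags.pop(r)
--         cc_frags[fragid] = fl
--         cc_vars[fragid] = vs
--         for v in vs:
--             var2cc[v] = fragid
--     return list(cc_frags.values())
-- ===== Notes on version B (the rewrite author's own statement) =====
-- stated objective: alternative
-- what changed: A locates overlapping components by scanning every existing component and intersecting varid sets; B instead keeps a dict mapping each varid to the id of the component currently containing it, finds the overlapped components by direct per-varid lookup (no scan over components, no intersections), stores components in dicts keyed by the creating fragment index, and returns the fragment-list dict's values, whose insertion order coincides with A's component order.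
import Mathlib
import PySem

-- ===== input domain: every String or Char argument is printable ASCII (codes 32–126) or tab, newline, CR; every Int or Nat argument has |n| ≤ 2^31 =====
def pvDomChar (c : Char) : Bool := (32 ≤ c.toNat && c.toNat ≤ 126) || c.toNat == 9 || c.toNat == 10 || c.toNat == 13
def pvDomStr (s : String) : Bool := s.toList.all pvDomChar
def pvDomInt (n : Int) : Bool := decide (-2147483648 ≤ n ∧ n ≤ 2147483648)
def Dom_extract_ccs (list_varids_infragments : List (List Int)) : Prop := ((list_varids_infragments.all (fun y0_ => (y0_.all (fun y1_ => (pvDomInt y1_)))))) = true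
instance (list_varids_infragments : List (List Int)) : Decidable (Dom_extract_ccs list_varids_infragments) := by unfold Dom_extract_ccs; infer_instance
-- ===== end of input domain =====

-- B replaces A's scan of every existing component (a set intersection per component per
-- fragment) by a dict varid -> current component id: the overlapped components are found
-- by direct lookup of the fragment's own varids instead of a scan over all components.

-- ===== PORT A =====
-- helper: Python's 'del l[i]' — exact where the index is valid (as in A, where every
-- index comes from enumerate over the same list); out-of-range leaves l (unreachable in A).
def pyDel {α : Type} (l : List α) (i : Int) : List α :=
  match PySem.List.pop? l i with
  | some (_, r) => r
  | none => l

-- one iteration of A's outer loop: state = (list_ccs_varids, list_ccs_fragids)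
def extract_ccs_step (st : List (PySem.Set Int) × List (List Int)) (fp : Int × List Int) :
    List (PySem.Set Int) × List (List Int) :=
  let fragid := fp.1
  let set_varids_infragment : PySem.Set Int := PySem.Set.ofList fp.2
  let cc_id_overlapped_list : List Int :=
    (PySem.List.enumerate st.1 0).foldl
      (fun acc q =>
        if (PySem.Set.inter set_varids_infragment q.2).length ≠ 0 then acc ++ [q.1] else acc) []
  let merged :=
    cc_id_overlapped_list.foldl
      (fun (m : PySem.Set Int × List Int) cc_id =>
        (PySem.Set.union m.1 (PySem.List.pyGetD st.1 cc_id []),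
         m.2 ++ PySem.List.pyGetD st.2 cc_id []))
      (set_varids_infragment, [fragid])
  let removed :=
    (PySem.List.sorted cc_id_overlapped_list (fun x => x) true).foldl
      (fun (r : List (PySem.Set Int) × List (List Int)) cc_id =>
        (pyDel r.1 cc_id, pyDel r.2 cc_id)) (st.1, st.2)
  (removed.1 ++ [merged.1], removed.2 ++ [merged.2])

def extract_ccs (list_varids_infragments : List (List Int)) : List (List Int) :=
  ((PySem.List.enumerate list_varids_infragments 0).foldl extract_ccs_step ([], [])).2

-- ===== PORT B =====
-- helper: Python dict.pop(k) — exact where k is present (as in B, where every root id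
-- names a live component); a missing key (KeyError, unreachable in B) yields (dflt, d).
def dictPop {ν : Type} (d : PySem.Dict Int ν) (k : Int) (dflt : ν) : ν × PySem.Dict Int ν :=
  match PySem.Dict.pop? d k with
  | some r => r
  | none => (dflt, d)

-- '{var2cc[v] for v in varids if v in var2cc}' built one lookup at a time
def bLookupAdd (w : PySem.Dict Int Int) (s : PySem.Set Int) (v : Int) : PySem.Set Int :=
  match w.get? v with
  | some c => PySem.Set.add s c
  | none => s

-- body of 'for r in roots: vs |= cc_vars.pop(r); fl += cc_frags.pop(r)';
-- loop state m = (vs, fl, cc_vars, cc_frags)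
def bPopStep (m : PySem.Set Int × List Int × PySem.Dict Int (PySem.Set Int) × PySem.Dict Int (List Int))
    (r : Int) : PySem.Set Int × List Int × PySem.Dict Int (PySem.Set Int) × PySem.Dict Int (List Int) :=
  let pv := dictPop m.2.2.1 r []
  let pf := dictPop m.2.2.2 r []
  (PySem.Set.union m.1 pv.1, m.2.1 ++ pf.1, pv.2, pf.2)

-- one iteration of B's outer loop: state = (var2cc, cc_frags, cc_vars)
def extract_ccs_alt_step
    (st : PySem.Dict Int Int × PySem.Dict Int (List Int) × PySem.Dict Int (PySem.Set Int))
    (fp : Int × List Int) :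
    PySem.Dict Int Int × PySem.Dict Int (List Int) × PySem.Dict Int (PySem.Set Int) :=
  let fragid := fp.1
  let roots : List Int :=
    PySem.List.sorted (fp.2.foldl (bLookupAdd st.1) PySem.Set.empty) (fun x => x)
  let m := roots.foldl bPopStep (PySem.Set.ofList fp.2, [fragid], st.2.2, st.2.1)
  let cc_frags := m.2.2.2.insert fragid m.2.1
  let cc_vars := m.2.2.1.insert fragid m.1
  -- 'for v in vs: var2cc[v] = fragid' — iterates a set, but var2cc is only looked up
  -- afterwards, so the result does not depend on Python's set iteration order
  let var2cc := m.1.foldl (fun (d : PySem.Dict Int Int) v => d.insert v fragid) st.1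
  (var2cc, cc_frags, cc_vars)

def extract_ccs_alt (list_varids_infragments : List (List Int)) : List (List Int) :=
  ((PySem.List.enumerate list_varids_infragments 0).foldl extract_ccs_alt_step
    (PySem.Dict.empty, PySem.Dict.empty, PySem.Dict.empty)).2.1.values

-- ===== PRECONDITION & SPEC =====
def Spec_extract_ccs (list_varids_infragments : List (List Int)) (out : List (List Int)) : Prop := out = extract_ccs_alt list_varids_infragments
instance (list_varids_infragments : List (List Int)) (out : List (List Int)) : Decidable (Spec_extract_ccs list_varids_infragments out) := by unfold Spec_extract_ccs; infer_instance

-- ===== CLAIM (what is proved, stated in full; the proofs are below) =====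
def Claim_equal_extract_ccs : Prop := ∀ (list_varids_infragments : List (List Int)), Dom_extract_ccs list_varids_infragments → Spec_extract_ccs list_varids_infragments (extract_ccs list_varids_infragments)

-- ===== LEMMAS AND PROOFS =====

-- ---- A-side characterisation: A's step keeps the non-overlapped components in order
-- ---- and appends one merged component ----

-- positions (ascending) of the elements of a list satisfying pb
def idxsOf {α : Type} (pb : α → Bool) : List α → List Nat
  | [] => []
  | c :: l => (if pb c then [0] else []) ++ (idxsOf pb l).map (· + 1)

theorem pyDel_natCast {α : Type} (l : List α) (n : Nat) : pyDel l (n : Int) = l.eraseIdx n := by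
  by_cases h : n < l.length
  · simp [pyDel, PySem.List.pop?_natCast l n h]
  · have h1 : PySem.List.pop? l (n : Int) = none := by
      simp [PySem.List.pop?, PySem.List.pyIdx?]
      omega
    rw [pyDel, h1, List.eraseIdx_eq_self.mpr (by omega)]

theorem enum_filter_map_fst {α : Type} (pb : α → Bool) (L : List α) : ∀ s : Int,
    ((PySem.List.enumerate L s).filter (fun q => pb q.2)).map (·.1)
      = (idxsOf pb L).map (fun (k : Nat) => s + (k : Int)) := by
  induction L with
  | nil => intro s; simp [PySem.List.enumerate, idxsOf]
  | cons c L ih =>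
    intro s
    have comp : ∀ I : List Nat,
        (I.map (· + 1)).map (fun (k : Nat) => s + (k : Int)) = I.map (fun (k : Nat) => (s + 1) + (k : Int)) := by
      intro I
      rw [List.map_map]
      apply List.map_congr_left
      intro k _
      simp only [Function.comp_apply]
      push_cast
      ring
    rw [PySem.List.enumerate_cons]
    cases hpc : pb c
    · rw [List.filter_cons_of_neg (by simp [hpc]), ih (s + 1), idxsOf, hpc]
      simp only [Bool.false_eq_true, if_false, List.nil_append]
      rw [comp]
    · rw [List.filter_cons_of_pos (by simp [hpc]), List.map_cons, ih (s + 1), idxsOf, hpc]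
      simp only [if_true, List.singleton_append, List.map_cons]
      rw [comp]
      simp

theorem idxs_map_getD {α β : Type} (pb : α → Bool) (d : β) : ∀ (V : List α) (F : List β),
    V.length = F.length →
    (idxsOf pb V).map (fun k => F.getD k d)
      = ((V.zip F).filter (fun c => pb c.1)).map (·.2) := by
  intro V
  induction V with
  | nil => intro F h; simp [idxsOf]
  | cons v V ih =>
    intro F h
    cases F with
    | nil => simp at h
    | cons f F =>
      simp only [List.length_cons, Nat.add_right_cancel_iff] at h
      have step : List.map ((fun k => (f :: F).getD k d) ∘ fun x => x + 1) (idxsOf pb V)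
          = List.map (fun k => F.getD k d) (idxsOf pb V) := by
        apply List.map_congr_left
        intro k _
        simp
      cases hpv : pb v
      · rw [idxsOf, hpv]
        simp only [Bool.false_eq_true, if_false, List.nil_append, List.map_map]
        rw [step, ih F h, List.zip_cons_cons, List.filter_cons_of_neg (by simp [hpv])]
      · rw [idxsOf, hpv]
        simp only [if_true, List.singleton_append, List.map_cons, List.map_map]
        rw [step, ih F h, List.zip_cons_cons, List.filter_cons_of_pos (by simp [hpv])]
        simp

theorem zip_self_filter {α : Type} (pb : α → Bool) : ∀ V : List α,
    ((V.zip V).filter (fun c => pb c.1)).map (·.2) = V.filter pb := by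
  intro V
  induction V with
  | nil => simp
  | cons v V ih => cases hpv : pb v <;> simp [hpv, ih]

theorem idxs_pairwise {α : Type} (pb : α → Bool) : ∀ L : List α,
    (idxsOf pb L).Pairwise (· < ·) := by
  intro L
  induction L with
  | nil => simp [idxsOf]
  | cons c L ih =>
    rw [idxsOf, List.pairwise_append]
    refine ⟨?_, ?_, ?_⟩
    · cases pb c <;> simp
    · exact (List.pairwise_map).2 (ih.imp (by omega))
    · intro a ha b hb
      cases hpc : pb c <;> simp [hpc] at ha
      subst ha
      rcases List.mem_map.1 hb with ⟨k, _, rfl⟩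
      omega

theorem erase_cons_fold {α : Type} : ∀ (ks : List Nat) (c : α) (M : List α),
    (ks.map (· + 1)).foldl (fun m k => m.eraseIdx k) (c :: M)
      = c :: ks.foldl (fun m k => m.eraseIdx k) M := by
  intro ks
  induction ks with
  | nil => intro c M; simp
  | cons k ks ih => intro c M; simp [List.eraseIdx_cons_succ, ih]

theorem descdel {α β : Type} (pb : α → Bool) : ∀ (V : List α) (F : List β),
    V.length = F.length →
    ((idxsOf pb V).reverse).foldl (fun m k => m.eraseIdx k) F
      = ((V.zip F).filter (fun c => !pb c.1)).map (·.2) := by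
  intro V
  induction V with
  | nil =>
    intro F h
    cases F with
    | nil => simp [idxsOf]
    | cons b t => simp at h
  | cons v V ih =>
    intro F h
    cases F with
    | nil => simp at h
    | cons f F =>
      simp only [List.length_cons, Nat.add_right_cancel_iff] at h
      rw [idxsOf, List.reverse_append, List.foldl_append, ← List.map_reverse, erase_cons_fold,
        ih F h]
      cases hpv : pb v <;> simp [hpv]

theorem pbeq (fv c : PySem.Set Int) :
    (decide ((PySem.Set.inter fv c).length ≠ 0)) = !PySem.Set.isdisjoint fv c := by
  cases hd : PySem.Set.isdisjoint fv c
  · have ⟨x, hx, hxc⟩ : ∃ x ∈ fv, x ∈ c := by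
      by_contra hcon
      push Not at hcon
      have := (PySem.Set.isdisjoint_iff fv c).2 hcon
      rw [hd] at this
      exact Bool.false_ne_true this
    have : x ∈ PySem.Set.inter fv c := (PySem.Set.mem_inter fv c x).2 ⟨hx, hxc⟩
    have : (PySem.Set.inter fv c).length ≠ 0 := by
      intro h0
      rw [List.length_eq_zero_iff] at h0
      simp [h0] at this
    simp [this]
  · have hall := (PySem.Set.isdisjoint_iff fv c).1 hd
    have : PySem.Set.inter fv c = [] := by
      rw [List.eq_nil_iff_forall_not_mem]
      intro x hx
      rcases (PySem.Set.mem_inter fv c x).1 hx with ⟨h1, h2⟩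
      exact hall x h1 h2
    simp [this]

-- A's step as filters
theorem stepA_eq (V : List (PySem.Set Int)) (F : List (List Int)) (fp : Int × List Int)
    (h : V.length = F.length) :
    extract_ccs_step (V, F) fp =
      (V.filter (fun c => PySem.Set.isdisjoint (PySem.Set.ofList fp.2) c)
         ++ [(V.filter (fun c => !PySem.Set.isdisjoint (PySem.Set.ofList fp.2) c)).foldl
               PySem.Set.union (PySem.Set.ofList fp.2)],
       ((V.zip F).filter (fun c => PySem.Set.isdisjoint (PySem.Set.ofList fp.2) c.1)).map (·.2)
         ++ [[fp.1] ++ (((V.zip F).filter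
               (fun c => !PySem.Set.isdisjoint (PySem.Set.ofList fp.2) c.1)).map (·.2)).flatten]) := by
  simp only [extract_ccs_step]
  set fv : PySem.Set Int := PySem.Set.ofList fp.2 with hfv
  set pb : PySem.Set Int → Bool := fun c => !PySem.Set.isdisjoint fv c with hpb
  set I : List Nat := idxsOf pb V with hI
  have hoverl :
      (PySem.List.enumerate V 0).foldl
        (fun acc q => if (PySem.Set.inter fv q.2).length ≠ 0 then acc ++ [q.1] else acc) []
      = I.map (fun (k : Nat) => (k : Int)) := by
    rw [PySem.List.foldl_append_ite (fun q => (PySem.Set.inter fv q.2).length ≠ 0)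
      (fun q => q.1) (PySem.List.enumerate V 0) [], List.nil_append]
    rw [List.filter_congr (q := fun r => pb r.2) (fun r _ => by rw [pbeq fv r.2])]
    rw [enum_filter_map_fst pb V 0]
    apply List.map_congr_left
    intro k _
    simp
  rw [hoverl]
  have hsort : PySem.List.sorted (I.map (fun (k : Nat) => (k : Int))) (fun x => x) true
      = (I.map (fun (k : Nat) => (k : Int))).reverse := by
    apply PySem.List.sorted_rev_eq_of_perm_of_pairwise_gt
    · exact List.reverse_perm _
    · rw [List.pairwise_reverse]
      exact List.pairwise_map.2 ((idxs_pairwise pb V).imp (fun hab => by exact_mod_cast hab))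
  rw [hsort]
  rw [PySem.List.foldl_prod_mk (fun (r : List (PySem.Set Int)) (i : Int) => pyDel r i)
    (fun (r : List (List Int)) (i : Int) => pyDel r i)]
  rw [PySem.List.foldl_prod_mk
    (fun (m : PySem.Set Int) (i : Int) => PySem.Set.union m (PySem.List.pyGetD V i []))
    (fun (a : List Int) (i : Int) => a ++ PySem.List.pyGetD F i [])]
  have hdel : ∀ {γ : Type} (L : List γ),
      ((I.map (fun (k : Nat) => (k : Int))).reverse).foldl (fun m i => pyDel m i) L
        = (I.reverse).foldl (fun m k => m.eraseIdx k) L := by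
    intro γ L
    rw [← List.map_reverse, List.foldl_map]
    congr 1
    funext m k
    exact pyDel_natCast m k
  have hr1 : ((I.map (fun (k : Nat) => (k : Int))).reverse).foldl (fun m i => pyDel m i) V
      = V.filter (fun c => !pb c) := by
    rw [hdel V, hI, descdel pb V V rfl, zip_self_filter (fun c => !pb c)]
  have hr2 : ((I.map (fun (k : Nat) => (k : Int))).reverse).foldl (fun m i => pyDel m i) F
      = ((V.zip F).filter (fun c => !pb c.1)).map (·.2) := by
    rw [hdel F, hI, descdel pb V F h]
  have hm1 : (I.map (fun (k : Nat) => (k : Int))).foldl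
      (fun m i => PySem.Set.union m (PySem.List.pyGetD V i [])) fv
      = (V.filter pb).foldl PySem.Set.union fv := by
    rw [List.foldl_map]
    have e : (fun (m : PySem.Set Int) (k : Nat) => PySem.Set.union m (PySem.List.pyGetD V (k : Int) []))
        = fun m k => PySem.Set.union m (V.getD k []) := by
      funext m k
      rw [PySem.List.pyGetD_natCast]
    rw [e, ← List.foldl_map (f := fun (k : Nat) => V.getD k []) (g := PySem.Set.union),
      hI, idxs_map_getD pb [] V V rfl, zip_self_filter pb]
  have hm2 : (I.map (fun (k : Nat) => (k : Int))).foldl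
      (fun a i => a ++ PySem.List.pyGetD F i []) [fp.1]
      = [fp.1] ++ (((V.zip F).filter (fun c => pb c.1)).map (·.2)).flatten := by
    rw [PySem.List.foldl_append_eq_flatMap, List.flatMap_def, List.map_map]
    have e : ((fun (i : Int) => PySem.List.pyGetD F i []) ∘ fun (k : Nat) => (k : Int))
        = fun (k : Nat) => F.getD k [] := by
      funext k
      simp
    rw [e, hI, idxs_map_getD pb [] V F h]
  rw [hr1, hr2, hm1, hm2]
  have e1 : V.filter (fun c => !pb c) = V.filter (fun c => PySem.Set.isdisjoint fv c) :=
    List.filter_congr (fun c _ => by simp [hpb])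
  have e2 : (V.zip F).filter (fun c => !pb c.1)
      = (V.zip F).filter (fun c => PySem.Set.isdisjoint fv c.1) :=
    List.filter_congr (fun c _ => by simp [hpb])
  rw [e1, e2]

-- ---- B-side lemmas ----

-- the proof-side view of B's component dicts: components as a list Z of
-- (id, varid set, fragid list), ids strictly increasing
def mkKV (Z : List (Int × PySem.Set Int × List Int)) : PySem.Dict Int (PySem.Set Int) :=
  ⟨Z.map (fun z => (z.1, z.2.1))⟩

def mkKF (Z : List (Int × PySem.Set Int × List Int)) : PySem.Dict Int (List Int) :=
  ⟨Z.map (fun z => (z.1, z.2.2))⟩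

-- invariant tying B's var2cc dict to the component list Z
def BInv (s : Int) (Z : List (Int × PySem.Set Int × List Int)) (w : PySem.Dict Int Int) : Prop :=
  (Z.map (·.1)).Pairwise (· < ·) ∧ (∀ z ∈ Z, z.1 < s) ∧
  (∀ v c, w.get? v = some c ↔ ∃ z ∈ Z, z.1 = c ∧ v ∈ z.2.1)

theorem mem_lookup_fold (w : PySem.Dict Int Int) : ∀ (l : List Int) (acc : PySem.Set Int) (x : Int),
    (x ∈ l.foldl (bLookupAdd w) acc) ↔ x ∈ acc ∨ ∃ v ∈ l, w.get? v = some x := by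
  intro l
  induction l with
  | nil => intro acc x; simp
  | cons v l ih =>
    intro acc x
    rw [List.foldl_cons]
    cases hv : w.get? v with
    | none =>
      rw [bLookupAdd, hv, ih]
      constructor
      · rintro (h | ⟨u, hu, hx⟩)
        · exact Or.inl h
        · exact Or.inr ⟨u, List.mem_cons_of_mem v hu, hx⟩
      · rintro (h | ⟨u, hu, hx⟩)
        · exact Or.inl h
        · rcases List.mem_cons.1 hu with rfl | hu
          · rw [hv] at hx; exact absurd hx (by simp)
          · exact Or.inr ⟨u, hu, hx⟩
    | some c =>
      rw [bLookupAdd, hv, ih]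
      rw [PySem.Set.mem_add]
      constructor
      · rintro ((h | rfl) | ⟨u, hu, hx⟩)
        · exact Or.inl h
        · exact Or.inr ⟨v, List.mem_cons_self, hv⟩
        · exact Or.inr ⟨u, List.mem_cons_of_mem v hu, hx⟩
      · rintro (h | ⟨u, hu, hx⟩)
        · exact Or.inl (Or.inl h)
        · rcases List.mem_cons.1 hu with rfl | hu
          · rw [hv] at hx
            exact Or.inl (Or.inr (by injection hx.symm))
          · exact Or.inr ⟨u, hu, hx⟩

theorem nodup_lookup_fold (w : PySem.Dict Int Int) : ∀ (l : List Int) (acc : PySem.Set Int),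
    acc.Nodup → (l.foldl (bLookupAdd w) acc).Nodup := by
  intro l
  induction l with
  | nil => intro acc h; exact h
  | cons v l ih =>
    intro acc h
    rw [List.foldl_cons]
    apply ih
    cases hv : w.get? v with
    | none => rw [bLookupAdd, hv]; exact h
    | some c => rw [bLookupAdd, hv]; exact PySem.Set.nodup_add acc c h

theorem mem_foldl_union : ∀ (L : List (PySem.Set Int)) (acc : PySem.Set Int) (x : Int),
    (x ∈ L.foldl PySem.Set.union acc) ↔ x ∈ acc ∨ ∃ t ∈ L, x ∈ t := by
  intro L
  induction L with
  | nil => intro acc x; simp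
  | cons t L ih =>
    intro acc x
    rw [List.foldl_cons, ih]
    rw [PySem.Set.mem_union]
    constructor
    · rintro ((h | h) | ⟨u, hu, hx⟩)
      · exact Or.inl h
      · exact Or.inr ⟨t, List.mem_cons_self, h⟩
      · exact Or.inr ⟨u, List.mem_cons_of_mem t hu, hx⟩
    · rintro (h | ⟨u, hu, hx⟩)
      · exact Or.inl (Or.inl h)
      · rcases List.mem_cons.1 hu with rfl | hu
        · exact Or.inl (Or.inr hx)
        · exact Or.inr ⟨u, hu, hx⟩

theorem get?_insert_fold : ∀ (l : List Int) (w : PySem.Dict Int Int) (s0 x : Int),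
    (l.foldl (fun (d : PySem.Dict Int Int) v => d.insert v s0) w).get? x
      = if x ∈ l then some s0 else w.get? x := by
  intro l
  induction l with
  | nil => intro w s0 x; simp
  | cons v l ih =>
    intro w s0 x
    rw [List.foldl_cons, ih]
    by_cases hm : x ∈ l
    · simp [hm]
    · rw [if_neg hm, PySem.Dict.get?_insert]
      by_cases hx : x = v
      · simp [hx]
      · simp [hx, hm]

-- the pop loop over a dict with an untouched head pair commutes with consing that pair
theorem popFold_cons (k : Int) (a : PySem.Set Int) (b : List Int) :
    ∀ (R : List Int), (∀ r ∈ R, r ≠ k) →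
    ∀ (vs : PySem.Set Int) (fl : List Int) (dv : PySem.Dict Int (PySem.Set Int))
      (df : PySem.Dict Int (List Int)),
    R.foldl bPopStep (vs, fl, ⟨(k, a) :: dv.items⟩, ⟨(k, b) :: df.items⟩)
      = ((R.foldl bPopStep (vs, fl, dv, df)).1,
         (R.foldl bPopStep (vs, fl, dv, df)).2.1,
         ⟨(k, a) :: (R.foldl bPopStep (vs, fl, dv, df)).2.2.1.items⟩,
         ⟨(k, b) :: (R.foldl bPopStep (vs, fl, dv, df)).2.2.2.items⟩) := by
  intro R
  induction R with
  | nil => intro _ vs fl dv df; rfl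
  | cons r R ih =>
    intro hr vs fl dv df
    have hrk : r ≠ k := hr r List.mem_cons_self
    have hbk : (k == r) = false := by simp [Ne.symm hrk]
    have hstep : bPopStep (vs, fl, (⟨(k, a) :: dv.items⟩ : PySem.Dict Int (PySem.Set Int)),
        (⟨(k, b) :: df.items⟩ : PySem.Dict Int (List Int))) r
        = ((bPopStep (vs, fl, dv, df) r).1, (bPopStep (vs, fl, dv, df) r).2.1,
           ⟨(k, a) :: (bPopStep (vs, fl, dv, df) r).2.2.1.items⟩,
           ⟨(k, b) :: (bPopStep (vs, fl, dv, df) r).2.2.2.items⟩) := by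
      simp only [bPopStep, dictPop, PySem.Dict.pop?]
      rw [PySem.Dict.get?_mk_cons, PySem.Dict.get?_mk_cons, hbk]
      simp only [Bool.false_eq_true, if_false]
      cases hv : PySem.Dict.get? dv r <;> cases hf : PySem.Dict.get? df r <;>
        simp [PySem.Dict.erase, hbk]
    rw [List.foldl_cons, List.foldl_cons, hstep,
      ih (fun r' hr' => hr r' (List.mem_cons_of_mem r hr'))]

-- the pop loop collects exactly the overlapped components (in id order) and leaves
-- the dicts holding exactly the others
theorem popFold (pb : (Int × PySem.Set Int × List Int) → Bool) :
    ∀ (Z : List (Int × PySem.Set Int × List Int)), (Z.map (·.1)).Nodup →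
    ∀ (vs : PySem.Set Int) (fl : List Int),
    ((Z.filter pb).map (·.1)).foldl bPopStep (vs, fl, mkKV Z, mkKF Z)
      = (((Z.filter pb).map (·.2.1)).foldl PySem.Set.union vs,
         fl ++ ((Z.filter pb).map (·.2.2)).flatten,
         mkKV (Z.filter (fun z => !pb z)), mkKF (Z.filter (fun z => !pb z))) := by
  intro Z
  induction Z with
  | nil => intro _ vs fl; simp [mkKV, mkKF]
  | cons z Z ih =>
    intro hnd vs fl
    rw [List.map_cons, List.nodup_cons] at hnd
    obtain ⟨hz, hnd⟩ := hnd
    cases hpz : pb z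
    · rw [List.filter_cons_of_neg (by simp [hpz])]
      have hmk : (mkKV (z :: Z), mkKF (z :: Z))
          = ((⟨(z.1, z.2.1) :: (mkKV Z).items⟩ : PySem.Dict Int (PySem.Set Int)),
             (⟨(z.1, z.2.2) :: (mkKF Z).items⟩ : PySem.Dict Int (List Int))) := rfl
      have hne : ∀ r ∈ (Z.filter pb).map (·.1), r ≠ z.1 := by
        intro r hrm
        rcases List.mem_map.1 hrm with ⟨u, hu, rfl⟩
        intro he
        exact hz (he ▸ List.mem_map.2 ⟨u, List.mem_of_mem_filter hu, rfl⟩)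
      have := popFold_cons z.1 z.2.1 z.2.2 ((Z.filter pb).map (·.1)) hne vs fl (mkKV Z) (mkKF Z)
      rw [show mkKV (z :: Z) = (⟨(z.1, z.2.1) :: (mkKV Z).items⟩ : PySem.Dict Int (PySem.Set Int)) from rfl,
        show mkKF (z :: Z) = (⟨(z.1, z.2.2) :: (mkKF Z).items⟩ : PySem.Dict Int (List Int)) from rfl,
        this, ih hnd vs fl,
        List.filter_cons_of_pos (by simp [hpz])]
      rfl
    · rw [List.filter_cons_of_pos (by simp [hpz]), List.map_cons, List.foldl_cons]
      have hbeq : (z.1 == z.1) = true := by simp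
      have hkeep : ∀ {ν : Type} (g : (Int × PySem.Set Int × List Int) → ν),
          ((Z.map (fun u => (u.1, g u))).filter (fun p => !(p.1 == z.1))) = Z.map (fun u => (u.1, g u)) := by
        intro ν g
        apply List.filter_eq_self.2
        intro p hp
        rcases List.mem_map.1 hp with ⟨u, hu, rfl⟩
        simp only [Bool.not_eq_eq_eq_not, Bool.not_true, beq_eq_false_iff_ne, ne_eq]
        intro he
        exact hz (he ▸ List.mem_map.2 ⟨u, hu, rfl⟩)
      have hstep : bPopStep (vs, fl, mkKV (z :: Z), mkKF (z :: Z)) z.1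
          = (PySem.Set.union vs z.2.1, fl ++ z.2.2, mkKV Z, mkKF Z) := by
        simp only [bPopStep, dictPop, PySem.Dict.pop?, mkKV, mkKF, List.map_cons]
        rw [PySem.Dict.get?_mk_cons, PySem.Dict.get?_mk_cons, hbeq]
        simp only [if_true, Option.map_some]
        simp only [PySem.Dict.erase]
        rw [List.filter_cons_of_neg (by simp), List.filter_cons_of_neg (by simp),
          hkeep (·.2.1), hkeep (·.2.2)]
      rw [hstep, ih hnd (PySem.Set.union vs z.2.1) (fl ++ z.2.2),
        List.filter_cons_of_neg (by simp [hpz])]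
      simp [List.append_assoc]

-- main simulation
theorem step_sim (s : Int) (varids : List Int) (Z : List (Int × PySem.Set Int × List Int))
    (w : PySem.Dict Int Int) (h : BInv s Z w) :
    ∃ Z' w', BInv (s + 1) Z' w' ∧
      extract_ccs_step (Z.map (·.2.1), Z.map (·.2.2)) (s, varids)
        = (Z'.map (·.2.1), Z'.map (·.2.2)) ∧
      extract_ccs_alt_step (w, mkKF Z, mkKV Z) (s, varids) = (w', mkKF Z', mkKV Z') := by
  obtain ⟨hpw, hlt, hfib⟩ := h
  have hndK : (Z.map (·.1)).Nodup := hpw.imp (fun hab => ne_of_lt hab)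
  set fv : PySem.Set Int := PySem.Set.ofList varids with hfv
  set pb : (Int × PySem.Set Int × List Int) → Bool :=
    fun z => !PySem.Set.isdisjoint fv z.2.1 with hpb
  have huniq : ∀ z z', z ∈ Z → z' ∈ Z → z.1 = z'.1 → z = z' :=
    fun z z' hz hz' he => List.inj_on_of_nodup_map hndK hz hz' he
  have hget : ∀ v z, z ∈ Z → v ∈ z.2.1 → w.get? v = some z.1 :=
    fun v z hz hv => (hfib v z.1).2 ⟨z, hz, rfl, hv⟩
  have hexists : ∀ t : PySem.Set Int, PySem.Set.isdisjoint fv t = false → ∃ v ∈ fv, v ∈ t := by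
    intro t ht
    by_contra hc
    push Not at hc
    rw [(PySem.Set.isdisjoint_iff fv t).2 hc] at ht
    exact Bool.true_eq_false.mp ht
  refine ⟨Z.filter (fun z => !pb z)
      ++ [(s, ((Z.filter pb).map (·.2.1)).foldl PySem.Set.union fv,
           [s] ++ ((Z.filter pb).map (·.2.2)).flatten)],
    (((Z.filter pb).map (·.2.1)).foldl PySem.Set.union fv).foldl
      (fun (d : PySem.Dict Int Int) v => d.insert v s) w, ?_, ?_, ?_⟩
  · -- BInv (s + 1)
    have hmemMerged : ∀ v, v ∈ ((Z.filter pb).map (·.2.1)).foldl PySem.Set.union fv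
        ↔ v ∈ fv ∨ ∃ z ∈ Z.filter pb, v ∈ z.2.1 := by
      intro v
      rw [mem_foldl_union]
      constructor
      · rintro (hv | ⟨t, ht, hvt⟩)
        · exact Or.inl hv
        · rcases List.mem_map.1 ht with ⟨z, hz, rfl⟩
          exact Or.inr ⟨z, hz, hvt⟩
      · rintro (hv | ⟨z, hz, hvz⟩)
        · exact Or.inl hv
        · exact Or.inr ⟨z.2.1, List.mem_map.2 ⟨z, hz, rfl⟩, hvz⟩
    refine ⟨?_, ?_, ?_⟩
    · rw [List.map_append, List.pairwise_append]
      refine ⟨List.Pairwise.sublist (List.Sublist.map _ List.filter_sublist) hpw, by simp, ?_⟩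
      intro a ha b hb
      rcases List.mem_map.1 ha with ⟨z, hz, rfl⟩
      simp only [List.map_cons, List.map_nil, List.mem_singleton] at hb
      subst hb
      exact hlt z (List.mem_of_mem_filter hz)
    · intro z hz
      rcases List.mem_append.1 hz with hz | hz
      · exact lt_trans (hlt z (List.mem_of_mem_filter hz)) (lt_add_one s)
      · simp only [List.mem_singleton] at hz
        subst hz
        exact lt_add_one s
    · intro v c
      rw [get?_insert_fold]
      by_cases hvm : v ∈ ((Z.filter pb).map (·.2.1)).foldl PySem.Set.union fv
      · rw [if_pos hvm]
        constructor
        · intro hc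
          refine ⟨(s, ((Z.filter pb).map (·.2.1)).foldl PySem.Set.union fv,
              [s] ++ ((Z.filter pb).map (·.2.2)).flatten),
            List.mem_append_right _ (List.mem_singleton.2 rfl), ?_, hvm⟩
          exact Option.some.inj hc
        · rintro ⟨z, hz, rfl, hvz⟩
          rcases List.mem_append.1 hz with hzk | hzl
          · exfalso
            have hzZ : z ∈ Z := List.mem_of_mem_filter hzk
            have hdisj : PySem.Set.isdisjoint fv z.2.1 = true := by
              have := (List.mem_filter.1 hzk).2
              simpa [hpb] using this
            rcases (hmemMerged v).1 hvm with hvf | ⟨z', hz'o, hvz'⟩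
            · exact ((PySem.Set.isdisjoint_iff fv z.2.1).1 hdisj v hvf) hvz
            · have hz'Z : z' ∈ Z := List.mem_of_mem_filter hz'o
              have he1 := hget v z hzZ hvz
              have he2 := hget v z' hz'Z hvz'
              have : z = z' := huniq z z' hzZ hz'Z (by rw [he1] at he2; exact Option.some.inj he2)
              subst this
              have := (List.mem_filter.1 hz'o).2
              rw [hpb] at this
              simp only [Bool.not_eq_true'] at this
              rw [hdisj] at this
              exact Bool.true_eq_false.mp this
          · simp only [List.mem_singleton] at hzl
            rw [hzl]
      · rw [if_neg hvm]
        rw [hfib v c]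
        constructor
        · rintro ⟨z, hz, rfl, hvz⟩
          have hnp : pb z = false := by
            by_contra hcp
            rw [Bool.not_eq_false] at hcp
            exact hvm ((hmemMerged v).2 (Or.inr ⟨z, List.mem_filter.2 ⟨hz, hcp⟩, hvz⟩))
          exact ⟨z, List.mem_append_left _ (List.mem_filter.2 ⟨hz, by simp [hnp]⟩), rfl, hvz⟩
        · rintro ⟨z, hz, rfl, hvz⟩
          rcases List.mem_append.1 hz with hzk | hzl
          · exact ⟨z, List.mem_of_mem_filter hzk, rfl, hvz⟩
          · exfalso
            simp only [List.mem_singleton] at hzl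
            subst hzl
            exact hvm hvz
  · -- A's step
    rw [stepA_eq _ _ _ (by simp)]
    simp only [List.zip_map', List.filter_map, List.map_map, List.map_append, List.map_cons,
      List.map_nil]
    rw [← hfv]
    have e1 : Z.filter ((fun c => PySem.Set.isdisjoint fv c) ∘ fun x => x.2.1)
        = Z.filter (fun z => !pb z) := by
      apply List.filter_congr
      intro z _
      simp [hpb, Function.comp]
    have e2 : Z.filter ((fun c => !PySem.Set.isdisjoint fv c) ∘ fun x => x.2.1)
        = Z.filter pb := by
      apply List.filter_congr
      intro z _
      simp [hpb, Function.comp]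
    have e3 : Z.filter ((fun c => PySem.Set.isdisjoint fv c.1) ∘ fun a => (a.2.1, a.2.2))
        = Z.filter (fun z => !pb z) := by
      apply List.filter_congr
      intro z _
      simp [hpb, Function.comp]
    have e4 : Z.filter ((fun c => !PySem.Set.isdisjoint fv c.1) ∘ fun a => (a.2.1, a.2.2))
        = Z.filter pb := by
      apply List.filter_congr
      intro z _
      simp [hpb, Function.comp]
    rw [e1, e2, e3, e4]
    simp [Function.comp]
    exact congrArg List.flatten (List.map_congr_left (fun z _ => rfl))
  · -- B's step
    simp only [extract_ccs_alt_step]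
    rw [← hfv]
    have hnodupRoots : (varids.foldl (bLookupAdd w) PySem.Set.empty).Nodup :=
      nodup_lookup_fold w varids PySem.Set.empty List.nodup_nil
    have hpwR : ((Z.filter pb).map (·.1)).Pairwise (· < ·) :=
      List.Pairwise.sublist (List.Sublist.map _ List.filter_sublist) hpw
    have hndR : ((Z.filter pb).map (·.1)).Nodup := hpwR.imp (fun hab => ne_of_lt hab)
    have hmem : ∀ x, (x ∈ varids.foldl (bLookupAdd w) PySem.Set.empty)
        ↔ x ∈ (Z.filter pb).map (·.1) := by
      intro x
      rw [mem_lookup_fold]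
      constructor
      · rintro (hx | ⟨v, hv, hg⟩)
        · exact absurd hx (List.not_mem_nil)
        · rcases (hfib v x).1 hg with ⟨z, hz, rfl, hvz⟩
          refine List.mem_map.2 ⟨z, List.mem_filter.2 ⟨hz, ?_⟩, rfl⟩
          rw [hpb]
          simp only [Bool.not_eq_eq_eq_not]
          by_contra hcd
          have : PySem.Set.isdisjoint fv z.2.1 = true := by
            cases hdd : PySem.Set.isdisjoint fv z.2.1
            · exact absurd hdd hcd
            · rfl
          exact ((PySem.Set.isdisjoint_iff fv z.2.1).1 this v
            ((PySem.Set.mem_ofList varids v).2 hv)) hvz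
      · intro hx
        rcases List.mem_map.1 hx with ⟨z, hzf, rfl⟩
        have hzZ : z ∈ Z := List.mem_of_mem_filter hzf
        have hdisj : PySem.Set.isdisjoint fv z.2.1 = false := by
          have := (List.mem_filter.1 hzf).2
          rw [hpb] at this
          simpa using this
        rcases hexists z.2.1 hdisj with ⟨v, hvf, hvz⟩
        exact Or.inr ⟨v, (PySem.Set.mem_ofList varids v).1 hvf, hget v z hzZ hvz⟩
    have hperm : ((Z.filter pb).map (·.1)).Perm (varids.foldl (bLookupAdd w) PySem.Set.empty) :=
      (List.perm_ext_iff_of_nodup hndR hnodupRoots).2 (fun a => (hmem a).symm)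
    have hsorted : PySem.List.sorted (varids.foldl (bLookupAdd w) PySem.Set.empty) (fun x => x)
        = (Z.filter pb).map (·.1) :=
      PySem.List.sorted_eq_of_perm_of_pairwise_lt _ _ _ hperm hpwR
    rw [hsorted, popFold pb Z hndK fv [s]]
    have hcF : (mkKF (Z.filter (fun z => !pb z))).contains s = false := by
      by_contra hc
      rw [Bool.not_eq_false] at hc
      have := (PySem.Dict.contains_iff_mem_keys _ _).1 hc
      simp only [mkKF, PySem.Dict.keys, List.map_map] at this
      rcases List.mem_map.1 this with ⟨z, hz, hzs⟩
      exact absurd ((show z.1 = s from hzs) ▸ hlt z (List.mem_of_mem_filter hz)) (lt_irrefl s)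
    have hcV : (mkKV (Z.filter (fun z => !pb z))).contains s = false := by
      by_contra hc
      rw [Bool.not_eq_false] at hc
      have := (PySem.Dict.contains_iff_mem_keys _ _).1 hc
      simp only [mkKV, PySem.Dict.keys, List.map_map] at this
      rcases List.mem_map.1 this with ⟨z, hz, hzs⟩
      exact absurd ((show z.1 = s from hzs) ▸ hlt z (List.mem_of_mem_filter hz)) (lt_irrefl s)
    have hinsF : (mkKF (Z.filter (fun z => !pb z))).insert s
          ([s] ++ ((Z.filter pb).map (·.2.2)).flatten)
        = mkKF (Z.filter (fun z => !pb z)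
            ++ [(s, ((Z.filter pb).map (·.2.1)).foldl PySem.Set.union fv,
                 [s] ++ ((Z.filter pb).map (·.2.2)).flatten)]) := by
      apply PySem.Dict.ext
      rw [PySem.Dict.items_insert_of_not_contains _ _ hcF]
      simp [mkKF]
    have hinsV : (mkKV (Z.filter (fun z => !pb z))).insert s
          (((Z.filter pb).map (·.2.1)).foldl PySem.Set.union fv)
        = mkKV (Z.filter (fun z => !pb z)
            ++ [(s, ((Z.filter pb).map (·.2.1)).foldl PySem.Set.union fv,
                 [s] ++ ((Z.filter pb).map (·.2.2)).flatten)]) := by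
      apply PySem.Dict.ext
      rw [PySem.Dict.items_insert_of_not_contains _ _ hcV]
      simp [mkKV]
    rw [hinsF, hinsV]

theorem main_sim : ∀ (L : List (List Int)) (s : Int) (Z : List (Int × PySem.Set Int × List Int))
    (w : PySem.Dict Int Int), BInv s Z w →
    ∃ Z' w',
      (PySem.List.enumerate L s).foldl extract_ccs_step (Z.map (·.2.1), Z.map (·.2.2))
        = (Z'.map (·.2.1), Z'.map (·.2.2)) ∧
      (PySem.List.enumerate L s).foldl extract_ccs_alt_step (w, mkKF Z, mkKV Z)
        = (w', mkKF Z', mkKV Z') := by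
  intro L
  induction L with
  | nil => intro s Z w _; exact ⟨Z, w, rfl, rfl⟩
  | cons x L ih =>
    intro s Z w h
    obtain ⟨Z1, w1, h1, hA, hB⟩ := step_sim s x Z w h
    rw [PySem.List.enumerate_cons, List.foldl_cons, List.foldl_cons, hA, hB]
    exact ih (s + 1) Z1 w1 h1

-- ===== VERDICT (by name: the statement is the Claim_ definition above) =====
theorem extract_ccs_spec : Claim_equal_extract_ccs := by
  intro xs _
  unfold Spec_extract_ccs extract_ccs extract_ccs_alt
  have h0 : BInv 0 [] PySem.Dict.empty := by
    refine ⟨List.Pairwise.nil, by simp, ?_⟩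
    intro v c
    simp [PySem.Dict.get?, PySem.Dict.empty]
  obtain ⟨Z', w', hA, hB⟩ := main_sim xs 0 [] PySem.Dict.empty h0
  have eA : (PySem.List.enumerate xs 0).foldl extract_ccs_step ([], [])
      = (Z'.map (·.2.1), Z'.map (·.2.2)) := hA
  have eB : (PySem.List.enumerate xs 0).foldl extract_ccs_alt_step
      (PySem.Dict.empty, PySem.Dict.empty, PySem.Dict.empty) = (w', mkKF Z', mkKV Z') := hB
  rw [eA, eB]
  simp [mkKF, PySem.Dict.values]
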